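-- pv_equiv track=rewrite | github.com/IsabelaGomes/INF610_codes | Python_força_bruta_backtrack/moda.py | M_FRQ
-- ===== SOURCE A (Python) =====
-- def M_FRQ(A):
--     n_occ = 0; m_frq = A[0]; count = 1; x = 0
--     #o contador se inicia em 1, pois um termo aparece ao menos uma vez
--     for i in range(len(A)): #percorre todo o array
--         for j in range(i+1, len(A)):
--             #Cada elemento é comparado com os elementos a frente no array
--             if A[i] == A[j]:
--                 count += 1
--             x +=1
--         if count > n_occ: #assume os valores mais frequentes
--             n_occ = count
--             m_frq = A[i]
--         count = 1 #reinicia o Contador para verificar o próximo elemento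
--     return m_frq, n_occ, x
-- ===== SOURCE B (Python) =====
-- def M_FRQ(A):
--     counts = {}
--     for v in A:
--         counts[v] = counts.get(v, 0) + 1
--     n_occ = 0
--     m_frq = A[0]
--     for v in A:
--         c = counts[v]
--         if c > n_occ:
--             n_occ = c
--             m_frq = v
--     n = len(A)
--     return m_frq, n_occ, n * (n - 1) // 2
-- ===== Notes on version B (the rewrite author's own statement) =====
-- stated objective: faster
-- what changed: replaces the quadratic nested comparison loops by a one-pass frequency dictionary plus a single scan (earliest first-occurrence wins ties, as in A), and computes the comparison counter x by the closed form n*(n-1)//2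
import Mathlib
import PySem

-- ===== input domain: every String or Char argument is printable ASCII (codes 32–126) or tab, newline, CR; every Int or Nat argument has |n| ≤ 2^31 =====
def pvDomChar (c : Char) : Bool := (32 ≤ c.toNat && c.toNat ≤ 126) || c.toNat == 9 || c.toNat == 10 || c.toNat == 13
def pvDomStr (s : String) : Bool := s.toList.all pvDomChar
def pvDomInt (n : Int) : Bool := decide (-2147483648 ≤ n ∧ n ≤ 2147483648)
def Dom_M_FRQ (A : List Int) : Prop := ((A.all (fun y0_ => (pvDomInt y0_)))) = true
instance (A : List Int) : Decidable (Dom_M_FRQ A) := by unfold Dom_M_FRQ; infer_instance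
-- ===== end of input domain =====

-- B replaces A's quadratic nested comparison loops by a one-pass frequency dict, a single
-- scan for the first maximum, and the closed form n*(n-1)//2 for the comparison counter.


-- ===== PORT A =====
def M_FRQ (A : List Int) : Int × Int × Int :=
  let n : Int := A.length
  -- n_occ = 0; m_frq = first element; count = 1; x = 0  (indexing the first element raises IndexError on the empty list, excluded by Pre_)
  let s0 : Int × Int × Int := (0, PySem.List.pyGetD A 0 0, 0)
  let fin := (PySem.List.pyRange 0 n 1).foldl (fun s i =>
    let cx := (PySem.List.pyRange (i + 1) n 1).foldl
      (fun cx j => (if PySem.List.pyGetD A i 0 == PySem.List.pyGetD A j 0 then cx.1 + 1 else cx.1,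
                    cx.2 + 1))
      (1, s.2.2)
    if cx.1 > s.1 then (cx.1, PySem.List.pyGetD A i 0, cx.2) else (s.1, s.2.1, cx.2)) s0
  (fin.2.1, fin.1, fin.2.2)

-- ===== PORT B =====
def M_FRQ_alt (A : List Int) : Int × Int × Int :=
  let counts : PySem.Dict Int Int :=
    A.foldl (fun d v => d.insert v (d.getD v 0 + 1)) PySem.Dict.empty
  -- taking the first element raises IndexError on the empty list, excluded by Pre_; the counts lookup never misses since v ∈ A
  let best : Int × Int :=
    A.foldl (fun s v => let c := counts.getD v 0; if c > s.1 then (c, v) else s)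
      (0, PySem.List.pyGetD A 0 0)
  let n : Int := A.length
  (best.2, best.1, PySem.Int.floordiv (n * (n - 1)) 2)

-- ===== PRECONDITION & SPEC =====
-- A indexes its first element unconditionally, so it raises IndexError on the empty list (and so does B).
def Pre_M_FRQ (A : List Int) : Prop := A ≠ []
instance (A : List Int) : Decidable (Pre_M_FRQ A) := by unfold Pre_M_FRQ; infer_instance
def pvWitness_M_FRQ : List Int := ([1, 2, 2])
def Spec_M_FRQ (A : List Int) (out : Int × Int × Int) : Prop := out = M_FRQ_alt A
instance (A : List Int) (out : Int × Int × Int) : Decidable (Spec_M_FRQ A out) := by unfold Spec_M_FRQ; infer_instance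

-- ===== CLAIM (what is proved, stated in full; the proofs are below) =====
def Claim_equal_M_FRQ : Prop := ∀ (A : List Int), Dom_M_FRQ A → Pre_M_FRQ A → Spec_M_FRQ A (M_FRQ A)

-- ===== LEMMAS AND PROOFS =====

def fsel : List Int → Int × Int → Int × Int
  | [], s => s
  | a :: t, s =>
      fsel t (if ((((a :: t).count a : Nat) : Int) > s.1) then (((a :: t).count a : Nat), a) else s)

def tri : Nat → Nat
  | 0 => 0
  | m + 1 => m + tri m

lemma two_tri (m : Nat) : 2 * tri m = m * (m - 1) := by
  induction m with
  | zero => rfl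
  | succ k ih => simp only [tri, Nat.mul_add, ih]; cases k <;> simp <;> ring

lemma map_getD_range {α : Type} (l : List α) (d : α) :
    (List.range l.length).map (fun k => l.getD k d) = l := by
  apply List.ext_getElem
  · simp
  · intro i h1 h2; simp [List.getD, List.getElem?_eq_getElem h2]

lemma pyGetD_append_nat (P l : List Int) (k : Nat) (d : Int) :
    PySem.List.pyGetD (P ++ l) ((P.length + k : Nat)) d = PySem.List.pyGetD l (k : Nat) d := by
  rw [PySem.List.pyGetD_natCast, PySem.List.pyGetD_natCast]
  simp [List.getD, List.getElem?_append_right (Nat.le_add_right _ _)]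

lemma outerA (t : List Int) : ∀ (P : List Int) (nocc mfr x : Int),
    (List.range t.length).foldl
      (fun s k =>
        let cx := (PySem.List.pyRange (((P.length + k : Nat) : Int) + 1) ((P ++ t).length : Int) 1).foldl
          (fun cx j => (if PySem.List.pyGetD (P ++ t) ((P.length + k : Nat)) 0 == PySem.List.pyGetD (P ++ t) j 0 then cx.1 + 1 else cx.1,
                        cx.2 + 1))
          (1, s.2.2)
        if cx.1 > s.1 then (cx.1, PySem.List.pyGetD (P ++ t) ((P.length + k : Nat)) 0, cx.2)
        else (s.1, s.2.1, cx.2))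
      (nocc, mfr, x)
    = ((fsel t (nocc, mfr)).1, (fsel t (nocc, mfr)).2, x + (tri t.length : Int)) := by
  induction t with
  | nil => intro P nocc mfr x; simp [fsel, tri]
  | cons a t' ih =>
    intro P nocc mfr x
    rw [List.length_cons, List.range_succ_eq_map]
    rw [List.foldl_cons, List.foldl_map]
    have hA0 : PySem.List.pyGetD (P ++ a :: t') ((P.length + 0 : Nat)) 0 = a := by
      rw [pyGetD_append_nat]; simp [PySem.List.pyGetD_natCast]
    have hr : (((P ++ a :: t').length : Int) - (((P.length + 0 : Nat) : Int) + 1)).toNat = t'.length := by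
      simp
    have hcount : ∀ c0 : Int,
        (List.range t'.length).foldl (fun c q => if t'.getD q 0 == a then c + 1 else c) c0
          = c0 + (t'.count a : Int) := by
      intro c0
      rw [show (fun (c : Int) (q : Nat) => if t'.getD q 0 == a then c + 1 else c)
            = (fun (c : Int) (q : Nat) => (fun (c : Int) (v : Int) => if v == a then c + 1 else c) c ((fun k => t'.getD k 0) q)) from rfl]
      rw [← List.foldl_map (f := fun k => t'.getD k 0) (g := fun (c : Int) (v : Int) => if v == a then c + 1 else c), map_getD_range, PySem.List.foldl_beq_add_one]
    have hadd : ∀ x0 : Int,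
        (List.range t'.length).foldl (fun (x : Int) (_ : Nat) => x + 1) x0 = x0 + (t'.length : Int) := by
      intro x0
      rw [show (fun (x : Int) (_ : Nat) => x + 1) = (fun (x : Int) (q : Nat) => x + (fun _ => (1:Int)) q) from rfl]
      rw [PySem.List.foldl_add, PySem.List.sum_map_const_int]
      simp
    have hinner : ∀ (x0 : Int),
        (PySem.List.pyRange (((P.length + 0 : Nat) : Int) + 1) ((P ++ a :: t').length : Int) 1).foldl
          (fun cx j => (if PySem.List.pyGetD (P ++ a :: t') ((P.length + 0 : Nat)) 0 == PySem.List.pyGetD (P ++ a :: t') j 0 then cx.1 + 1 else cx.1,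
                        cx.2 + 1)) (1, x0)
        = (1 + (t'.count a : Int), x0 + (t'.length : Int)) := by
      intro x0
      rw [PySem.List.pyRange_one, hr, List.foldl_map]
      rw [PySem.List.foldl_congr_mem _ _
            (fun (cx : Int × Int) (q : Nat) => ((if t'.getD q 0 == a then cx.1 + 1 else cx.1), cx.2 + 1)) _
            ?hacc]
      case hacc =>
        intro cx q hq
        beta_reduce
        rw [hA0]
        have h1 : ((P.length + 0 : Nat) : Int) + 1 + (q : Int) = (((P ++ [a]).length + q : Nat) : Int) := by
          push_cast; simp
        have h2 : P ++ a :: t' = (P ++ [a]) ++ t' := by simp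
        rw [h1, h2, pyGetD_append_nat, PySem.List.pyGetD_natCast, Bool.beq_comm]
      rw [PySem.List.foldl_prod_mk
            (f := fun (c : Int) (q : Nat) => if t'.getD q 0 == a then c + 1 else c)
            (g := fun (x : Int) (_ : Nat) => x + 1)]
      rw [hcount 1, hadd x0]
    simp only [hinner]
    have hbody : ∀ (s : Int × Int × Int), ∀ y ∈ List.range t'.length,
        (fun (s : Int × Int × Int) (k : Nat) =>
          let cx := (PySem.List.pyRange (((P.length + k : Nat) : Int) + 1) ((P ++ a :: t').length : Int) 1).foldl
            (fun cx j => (if PySem.List.pyGetD (P ++ a :: t') ((P.length + k : Nat)) 0 == PySem.List.pyGetD (P ++ a :: t') j 0 then cx.1 + 1 else cx.1,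
                          cx.2 + 1))
            (1, s.2.2)
          if cx.1 > s.1 then (cx.1, PySem.List.pyGetD (P ++ a :: t') ((P.length + k : Nat)) 0, cx.2)
          else (s.1, s.2.1, cx.2)) s y.succ
        = (fun (s : Int × Int × Int) (k : Nat) =>
          let cx := (PySem.List.pyRange ((((P ++ [a]).length + k : Nat) : Int) + 1) (((P ++ [a]) ++ t').length : Int) 1).foldl
            (fun cx j => (if PySem.List.pyGetD ((P ++ [a]) ++ t') (((P ++ [a]).length + k : Nat)) 0 == PySem.List.pyGetD ((P ++ [a]) ++ t') j 0 then cx.1 + 1 else cx.1,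
                          cx.2 + 1))
            (1, s.2.2)
          if cx.1 > s.1 then (cx.1, PySem.List.pyGetD ((P ++ [a]) ++ t') (((P ++ [a]).length + k : Nat)) 0, cx.2)
          else (s.1, s.2.1, cx.2)) s y := by
      intro s y hy
      have e1 : P.length + y.succ = (P ++ [a]).length + y := by simp; omega
      have e2 : P ++ a :: t' = (P ++ [a]) ++ t' := by simp
      simp only [e1, e2]
    rw [PySem.List.foldl_congr_mem _ _
          (fun (s : Int × Int × Int) (k : Nat) =>
            let cx := (PySem.List.pyRange ((((P ++ [a]).length + k : Nat) : Int) + 1) (((P ++ [a]) ++ t').length : Int) 1).foldl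
              (fun cx j => (if PySem.List.pyGetD ((P ++ [a]) ++ t') (((P ++ [a]).length + k : Nat)) 0 == PySem.List.pyGetD ((P ++ [a]) ++ t') j 0 then cx.1 + 1 else cx.1,
                            cx.2 + 1))
              (1, s.2.2)
            if cx.1 > s.1 then (cx.1, PySem.List.pyGetD ((P ++ [a]) ++ t') (((P ++ [a]).length + k : Nat)) 0, cx.2)
            else (s.1, s.2.1, cx.2)) _ ?hb]
    case hb =>
      intro acc y hy
      have e1 : P.length + y.succ = (P ++ [a]).length + y := by simp; omega
      have e2 : P ++ a :: t' = (P ++ [a]) ++ t' := by simp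
      simp only [e1, e2]
    have key : ∀ (init : Int × Int × Int),
        (List.range t'.length).foldl
          (fun (s : Int × Int × Int) (k : Nat) =>
            let cx := (PySem.List.pyRange ((((P ++ [a]).length + k : Nat) : Int) + 1) (((P ++ [a]) ++ t').length : Int) 1).foldl
              (fun cx j => (if PySem.List.pyGetD ((P ++ [a]) ++ t') (((P ++ [a]).length + k : Nat)) 0 == PySem.List.pyGetD ((P ++ [a]) ++ t') j 0 then cx.1 + 1 else cx.1,
                            cx.2 + 1))
              (1, s.2.2)
            if cx.1 > s.1 then (cx.1, PySem.List.pyGetD ((P ++ [a]) ++ t') (((P ++ [a]).length + k : Nat)) 0, cx.2)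
            else (s.1, s.2.1, cx.2)) init
        = ((fsel t' (init.1, init.2.1)).1, (fsel t' (init.1, init.2.1)).2, init.2.2 + (tri t'.length : Int)) := by
      intro init
      rcases init with ⟨n1, m1, x1⟩
      exact ih (P ++ [a]) n1 m1 x1
    rw [key]
    rw [hA0]
    simp only [fsel, List.count_cons_self]
    push_cast
    rw [show (1:Int) + (List.count a t' : Int) = (List.count a t' : Int) + 1 from add_comm _ _]
    split_ifs <;> (refine Prod.ext rfl (Prod.ext rfl ?_)) <;> (show _ = _) <;> (simp only [tri]; push_cast; ring)

lemma sel_eq (t : List Int) : ∀ (P : List Int) (s : Int × Int),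
    (∀ v : Int, 0 < P.count v → ((P.count v : Int) + (t.count v : Int)) ≤ s.1) →
    fsel t s = t.foldl (fun s v => if (((P ++ t).count v : Nat) : Int) > s.1
                        then ((((P ++ t).count v : Nat) : Int), v) else s) s := by
  induction t with
  | nil => intro P s _; simp [fsel]
  | cons a t' ih =>
    intro P s hinv
    rw [List.foldl_cons]
    have hstep : (if (((P ++ a :: t').count a : Nat) : Int) > s.1
           then ((((P ++ a :: t').count a : Nat) : Int), a) else s)
        = (if (((a :: t').count a : Nat) : Int) > s.1
           then ((((a :: t').count a : Nat) : Int), a) else s) := by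
      by_cases hP : P.count a = 0
      · simp [List.count_append, hP]
      · have h1 := hinv a (by omega)
        rw [if_neg, if_neg]
        · simp only [List.count_cons_self, List.count_append] at h1 ⊢
          push_cast at h1 ⊢
          omega
        · simp only [List.count_cons_self, List.count_append] at h1 ⊢
          push_cast at h1 ⊢
          omega
    rw [hstep]
    have hfsel : fsel (a :: t') s
        = fsel t' (if (((a :: t').count a : Nat) : Int) > s.1
                   then ((((a :: t').count a : Nat) : Int), a) else s) := rfl
    rw [hfsel]
    have hmono : s.1 ≤ (if (((a :: t').count a : Nat) : Int) > s.1
                   then ((((a :: t').count a : Nat) : Int), a) else s).1 := by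
      split_ifs with h
      · simp only [List.count_cons_self] at h ⊢; push_cast at h ⊢; omega
      · exact le_refl _
    have hinv' : ∀ v : Int, 0 < (P ++ [a]).count v →
        (((P ++ [a]).count v : Int) + (t'.count v : Int))
          ≤ (if (((a :: t').count a : Nat) : Int) > s.1
             then ((((a :: t').count a : Nat) : Int), a) else s).1 := by
      intro v hv
      by_cases hva : v = a
      · subst hva
        split_ifs with h
        · simp only [List.count_cons_self] at *
          simp [List.count_append]
          by_cases hP : P.count v = 0
          · simp [hP, List.count_cons_self]; push_cast; omega
          · have h1 := hinv v (by omega)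
            simp only [List.count_cons_self] at h1
            push_cast at h1 ⊢
            omega
        · simp only [List.count_cons_self] at h
          simp [List.count_append]
          by_cases hP : P.count v = 0
          · simp [hP, List.count_cons_self]; push_cast at h ⊢; omega
          · have h1 := hinv v (by omega)
            simp only [List.count_cons_self] at h1
            push_cast at h1 ⊢
            omega
      · have hPv : 0 < P.count v := by
          simpa [List.count_append, List.count_eq_zero, hva] using hv
        have h1 := hinv v hPv
        have e : (P ++ [a]).count v = P.count v := by simp [List.count_append, List.count_eq_zero, hva]
        have e2 : (a :: t').count v = t'.count v := by simp [List.count_cons, Ne.symm hva]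
        rw [e]
        refine le_trans ?_ hmono
        rw [e2] at h1
        exact h1
    rw [ih (P ++ [a]) _ hinv']
    have hassoc : (P ++ [a]) ++ t' = P ++ a :: t' := by simp
    rw [hassoc]

lemma tri_div (n : Nat) : PySem.Int.floordiv ((n : Int) * ((n : Int) - 1)) 2 = (tri n : Int) := by
  have hcast : ((n : Int) * ((n : Int) - 1)) = ((n * (n - 1) : Nat) : Int) := by
    cases n with
    | zero => simp
    | succ m => push_cast [Nat.succ_sub_one]; ring
  have h2 : 2 * tri n = n * (n - 1) := two_tri n
  rw [hcast, show ((2:Int)) = ((2:Nat):Int) from rfl, PySem.Int.floordiv_natCast]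
  congr 1
  omega

lemma M_FRQ_eval (a : Int) (t : List Int) :
    M_FRQ (a :: t) = ((fsel (a :: t) (0, a)).2, (fsel (a :: t) (0, a)).1, (tri (a :: t).length : Int)) := by
  have h0 : PySem.List.pyGetD (a :: t) 0 0 = a := by
    rw [show (0 : Int) = ((0 : Nat) : Int) from rfl, PySem.List.pyGetD_natCast]; rfl
  have HA := outerA (a :: t) []
  simp only [List.nil_append, List.length_nil, Nat.zero_add] at HA
  show (let n : Int := (a :: t).length
    let s0 : Int × Int × Int := (0, PySem.List.pyGetD (a :: t) 0 0, 0)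
    let fin := (PySem.List.pyRange 0 n 1).foldl (fun s i =>
      let cx := (PySem.List.pyRange (i + 1) n 1).foldl
        (fun cx j => (if PySem.List.pyGetD (a :: t) i 0 == PySem.List.pyGetD (a :: t) j 0 then cx.1 + 1 else cx.1,
                      cx.2 + 1))
        (1, s.2.2)
      if cx.1 > s.1 then (cx.1, PySem.List.pyGetD (a :: t) i 0, cx.2) else (s.1, s.2.1, cx.2)) s0
    (fin.2.1, fin.1, fin.2.2)) = _
  simp only [h0]
  rw [PySem.List.pyRange_zero_natCast, List.foldl_map]
  rw [HA 0 a 0]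
  simp

lemma M_FRQ_alt_eval (a : Int) (t : List Int) :
    M_FRQ_alt (a :: t) = ((fsel (a :: t) (0, a)).2, (fsel (a :: t) (0, a)).1, (tri (a :: t).length : Int)) := by
  have h0 : PySem.List.pyGetD (a :: t) 0 0 = a := by
    rw [show (0 : Int) = ((0 : Nat) : Int) from rfl, PySem.List.pyGetD_natCast]; rfl
  show (let counts : PySem.Dict Int Int :=
      (a :: t).foldl (fun d v => d.insert v (d.getD v 0 + 1)) PySem.Dict.empty
    let best : Int × Int :=
      (a :: t).foldl (fun s v => let c := counts.getD v 0; if c > s.1 then (c, v) else s)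
        (0, PySem.List.pyGetD (a :: t) 0 0)
    let n : Int := (a :: t).length
    (best.2, best.1, PySem.Int.floordiv (n * (n - 1)) 2)) = _
  simp only [h0, PySem.Dict.foldl_insert_getD_add_one_eq_counter]
  rw [PySem.List.foldl_congr_mem _ _
        (fun (s : Int × Int) (v : Int) =>
          if ((((a :: t).count v : Nat) : Int) > s.1) then ((((a :: t).count v : Nat) : Int), v) else s)
        _ (by intro acc v hv; simp only [PySem.Dict.getD_counter])]
  have HS := sel_eq (a :: t) [] (0, a) (by intro v hv; simp at hv)
  simp only [List.nil_append] at HS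
  rw [← HS, tri_div]

-- ===== VERDICT (by name: the statement is the Claim_ definition above) =====
theorem M_FRQ_spec : Claim_equal_M_FRQ := by
  intro A _ hpre
  unfold Spec_M_FRQ
  cases A with
  | nil => exact absurd rfl hpre
  | cons a t => rw [M_FRQ_eval, M_FRQ_alt_eval]
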